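-- pv_equiv track=rewrite | github.com/Rouzax/TrackSplit | src/tracksplit/metadata.py | deduplicate_titles
-- ===== SOURCE A (Python) =====
-- def deduplicate_titles(titles: list[str]) -> list[str]:
--     """Append track number in parens to duplicate titles.
--
--     "ID", "Track B", "ID" -> "ID (01)", "Track B", "ID (03)"
--     Non-duplicates are unchanged.
--     """
--     counts: dict[str, int] = {}
--     for t in titles:
--         counts[t] = counts.get(t, 0) + 1
--
--     duplicated = {t for t, c in counts.items() if c > 1}
--
--     result = []
--     for i, t in enumerate(titles):
--         if t in duplicated:
--             result.append(f"{t} ({i + 1:02d})")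
--         else:
--             result.append(t)
--     return result
-- ===== SOURCE B (Python) =====
-- def deduplicate_titles(titles: list[str]) -> list[str]:
--     """Append track number in parens to duplicate titles.
--
--     Online single pass: a title is a duplicate iff it was already seen
--     earlier or occurs again in the remaining suffix; no frequency table
--     and no precomputed duplicated-set are built.
--     """
--     result = []
--     seen = set()
--     for i, t in enumerate(titles):
--         if t in seen or t in titles[i + 1:]:
--             result.append(f"{t} ({i + 1:02d})")
--         else:
--             result.append(t)
--         seen.add(t)
--     return result
-- ===== Notes on version B (the rewrite author's own statement) =====
-- stated objective: alternative
-- what changed: Replaces A's two staged passes (build a frequency dict, derive a duplicated-set, then mark) with one online pass that never counts: each title is marked a duplicate iff it was seen earlier (seen-set accumulator) or occurs again in the remaining suffix (lookahead membership).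
import Mathlib
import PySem

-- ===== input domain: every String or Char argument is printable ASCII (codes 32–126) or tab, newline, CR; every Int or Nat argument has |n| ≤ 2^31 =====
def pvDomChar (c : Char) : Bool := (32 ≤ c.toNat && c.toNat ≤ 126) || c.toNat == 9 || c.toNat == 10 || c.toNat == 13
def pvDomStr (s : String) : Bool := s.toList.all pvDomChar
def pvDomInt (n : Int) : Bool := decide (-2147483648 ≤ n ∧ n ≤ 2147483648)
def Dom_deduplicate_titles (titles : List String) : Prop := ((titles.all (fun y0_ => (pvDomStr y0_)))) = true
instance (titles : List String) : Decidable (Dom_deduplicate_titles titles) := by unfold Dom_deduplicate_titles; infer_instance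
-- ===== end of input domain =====

-- B replaces A's staged frequency-dict + duplicated-set passes with one online pass: each title is a
-- duplicate iff seen earlier (seen-set) or occurring again in the remaining suffix (alternative, not faster).

-- f"{n:02d}" for n ≥ 0: decimal digits zero-padded to width 2 (exact for the nonnegative n both ports use)
def pvPad2 (n : Int) : String :=
  let s := PySem.Int.toStr n
  if s.toList.length < 2 then "0" ++ s else s

-- ===== PORT A =====
def deduplicate_titles (titles : List String) : List String :=
  let counts : PySem.Dict String Int :=
    titles.foldl (fun d t => d.insert t (d.getD t 0 + 1)) PySem.Dict.empty
  let duplicated : PySem.Set String :=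
    (counts.items.filter (fun p => 1 < p.2)).foldl (fun s p => PySem.Set.add s p.1) PySem.Set.empty
  (PySem.List.enumerate titles).foldl
    (fun result p =>
      if PySem.Set.contains duplicated p.2 then
        result ++ [p.2 ++ " (" ++ pvPad2 (p.1 + 1) ++ ")"]
      else
        result ++ [p.2]) []

-- ===== PORT B =====
def deduplicate_titles_alt (titles : List String) : List String :=
  ((PySem.List.enumerate titles).foldl
    (fun (st : List String × PySem.Set String) p =>
      ( if PySem.Set.contains st.2 p.2
            || (PySem.List.slice titles (some (p.1 + 1)) none).contains p.2 then
          st.1 ++ [p.2 ++ " (" ++ pvPad2 (p.1 + 1) ++ ")"]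
        else
          st.1 ++ [p.2],
        PySem.Set.add st.2 p.2))
    ([], PySem.Set.empty)).1

-- ===== PRECONDITION & SPEC =====
def Spec_deduplicate_titles (titles : List String) (out : List String) : Prop := out = deduplicate_titles_alt titles
instance (titles : List String) (out : List String) : Decidable (Spec_deduplicate_titles titles out) := by unfold Spec_deduplicate_titles; infer_instance

-- ===== CLAIM (what is proved, stated in full; the proofs are below) =====
def Claim_equal_deduplicate_titles : Prop := ∀ (titles : List String), Dom_deduplicate_titles titles → Spec_deduplicate_titles titles (deduplicate_titles titles)

-- ===== LEMMAS AND PROOFS =====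

-- the common normal form both ports are reduced to
def pvSpecMap (titles : List String) : List String :=
  (PySem.List.enumerate titles).map
    (fun p => if 1 < PySem.List.count titles p.2 then p.2 ++ " (" ++ pvPad2 (p.1 + 1) ++ ")" else p.2)

-- a foldl that appends one element in both branches is a map
theorem foldl_append_ite_singleton {α β : Type} (l : List α) (c : α → Bool) (f g : α → β) (acc : List β) :
    l.foldl (fun acc x => if c x then acc ++ [f x] else acc ++ [g x]) acc
      = acc ++ l.map (fun x => if c x then f x else g x) := by
  have : (fun (acc : List β) x => if c x then acc ++ [f x] else acc ++ [g x])
       = (fun acc x => acc ++ [if c x then f x else g x]) := by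
    funext acc x; by_cases h : c x <;> simp [h]
  rw [this, PySem.List.foldl_append_singleton_eq_map]

-- A's `duplicated` membership test equals the count test, for elements of titles
theorem contains_duplicated (titles : List String) (t : String) (ht : t ∈ titles) :
    PySem.Set.contains
      (((titles.foldl (fun d s => d.insert s (d.getD s 0 + 1)) (PySem.Dict.empty : PySem.Dict String Int)).items.filter
          (fun p => 1 < p.2)).foldl (fun s p => PySem.Set.add s p.1) PySem.Set.empty)
      t = decide (1 < PySem.List.count titles t) := by
  rw [PySem.Dict.foldl_insert_getD_add_one_eq_counter, PySem.Dict.items_counter]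
  have hfold : ∀ (l : List (String × Int)) (s : PySem.Set String),
      l.foldl (fun s p => PySem.Set.add s p.1) s = PySem.Set.update s (l.map Prod.fst) := by
    intro l
    induction l with
    | nil => intro s; rfl
    | cons x xs ih => intro s; simp [PySem.Set.update, List.foldl_cons] at *; exact ih _
  rw [hfold]
  show (PySem.Set.update PySem.Set.empty _).contains t = _
  rw [show (PySem.Set.empty : PySem.Set String) = [] from rfl, PySem.Set.update_nil_left]
  rw [List.filter_map, List.map_map, Bool.eq_iff_iff]
  simp only [PySem.Set.contains_iff, PySem.Set.mem_ofList, decide_eq_true_eq]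
  constructor
  · intro hc
    obtain ⟨k, hk, hkt⟩ := List.mem_map.mp hc
    have h2 := (List.mem_filter.mp hk).2
    simp only [Function.comp, decide_eq_true_eq] at h2 hkt
    subst hkt
    simpa [PySem.List.count] using h2
  · intro h
    refine List.mem_map.mpr ⟨t, List.mem_filter.mpr ⟨(PySem.Set.mem_ofList _ _).mpr ht, ?_⟩, rfl⟩
    simp only [Function.comp, decide_eq_true_eq]
    simpa [PySem.List.count] using h

-- A reduces to the normal form
theorem a_eq_spec (titles : List String) : deduplicate_titles titles = pvSpecMap titles := by
  unfold deduplicate_titles pvSpecMap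
  rw [foldl_append_ite_singleton]
  simp only [List.nil_append]
  apply List.map_congr_left
  intro p hp
  have hmem : p.2 ∈ titles := by
    obtain ⟨k, hk, rfl⟩ := (PySem.List.mem_enumerate_iff _ _ _).mp hp
    exact List.getElem_mem hk
  rw [contains_duplicated titles p.2 hmem]
  by_cases h : 1 < PySem.List.count titles p.2 <;> simp

-- B's online duplication test (seen earlier ∨ occurs later) equals the count test
theorem cond_eq (pre rs : List String) (t : String) :
    ((PySem.Set.ofList pre).contains t || rs.contains t)
      = decide (1 < PySem.List.count (pre ++ t :: rs) t) := by
  rw [Bool.eq_iff_iff]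
  simp only [Bool.or_eq_true, PySem.Set.contains_iff, PySem.Set.mem_ofList,
    List.contains_iff_mem, decide_eq_true_eq]
  simp only [← List.count_pos_iff, PySem.List.count, List.count_append,
    List.count_cons, beq_self_eq_true, if_true]
  omega

-- the B-side loop invariant
theorem alt_fold (titles : List String) : ∀ (rest pre acc : List String) (_ : pre ++ rest = titles),
    ((PySem.List.enumerate rest (pre.length : Int)).foldl
      (fun (st : List String × PySem.Set String) p =>
        ( if PySem.Set.contains st.2 p.2
              || (PySem.List.slice titles (some (p.1 + 1)) none).contains p.2 then
            st.1 ++ [p.2 ++ " (" ++ pvPad2 (p.1 + 1) ++ ")"]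
          else
            st.1 ++ [p.2],
          PySem.Set.add st.2 p.2))
      (acc, PySem.Set.ofList pre)).1
    = acc ++ (PySem.List.enumerate rest (pre.length : Int)).map
        (fun p => if 1 < PySem.List.count titles p.2 then p.2 ++ " (" ++ pvPad2 (p.1 + 1) ++ ")" else p.2) := by
  intro rest
  induction rest with
  | nil => intro pre acc h; simp [PySem.List.enumerate]
  | cons t rs ih =>
    intro pre acc h
    rw [PySem.List.enumerate_cons, List.foldl_cons, List.map_cons]
    have hslice : PySem.List.slice titles (some ((pre.length : Int) + 1)) none = rs := by
      have : ((pre.length : Int) + 1) = ((pre.length + 1 : Nat) : Int) := by push_cast; ring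
      rw [this, PySem.List.slice_from_natCast, ← h]
      simp [List.drop_append]
    have hcond := cond_eq pre rs t
    rw [h] at hcond
    have hlen : (pre.length : Int) + 1 = (((pre ++ [t]).length : Nat) : Int) := by
      simp
    have hofl : PySem.Set.add (PySem.Set.ofList pre) t = PySem.Set.ofList (pre ++ [t]) :=
      (PySem.Set.ofList_append_singleton pre t).symm
    simp only [hslice, hcond]
    by_cases hc : 1 < PySem.List.count titles t
    · simp only [hc, decide_true, if_pos trivial]
      rw [hofl, hlen, ih (pre ++ [t]) _ (by simpa using h)]
      simp
    · simp only [hc, decide_false, if_false]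
      rw [hofl, hlen, ih (pre ++ [t]) _ (by simpa using h)]
      simp

-- B reduces to the normal form
theorem b_eq_spec (titles : List String) : deduplicate_titles_alt titles = pvSpecMap titles := by
  unfold deduplicate_titles_alt pvSpecMap
  have := alt_fold titles titles [] [] (by simp)
  simpa using this

-- ===== VERDICT (by name: the statement is the Claim_ definition above) =====
theorem deduplicate_titles_spec : Claim_equal_deduplicate_titles := by
  intro titles _
  unfold Spec_deduplicate_titles
  rw [a_eq_spec, b_eq_spec]
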